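-- pv_equiv track=rewrite | github.com/DanielJH65/-LFP-Practica1_201901108 | main.py | separarAlumnos
-- ===== SOURCE A (Python) =====
-- def separarDatos(datos, separador):
--     temp = ""
--     listaTemp = []
--
--     for char in  datos:
--         if char == separador:
--             listaTemp.append(temp.strip())
--             temp = ""
--         else:
--             temp += char
--     if temp.strip() != "":
--         listaTemp.append(temp.strip())
--     return listaTemp
--
-- def separarAlumnos(datos):
--     alumnos1 = []
--     for i in datos:
--         i = i.replace("<","")
--         i = i.replace(">","")
--         i = i.replace(",","")
--         i = i.replace('"',"")
--         alumnos1.append(separarDatos(i,";"))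
--     return alumnos1
-- ===== SOURCE B (Python) =====
-- def _fila(i):
--     s = ''.join(c for c in i if c not in '<>,"')
--     parts = s.split(';')
--     fila = [p.strip() for p in parts[:-1]]
--     last = parts[-1].strip()
--     if last:
--         fila.append(last)
--     return fila
--
-- def separarAlumnos(datos):
--     return [_fila(i) for i in datos]
-- ===== Notes on version B (the rewrite author's own statement) =====
-- stated objective: idiomatic
-- what changed: The char-by-char tokenizer FSM with a temp accumulator is replaced by str.split(';') plus per-piece strip (keeping empty middle pieces and dropping an empty last piece), and the four sequential .replace scrubs by one single-pass character filter.
import Mathlib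
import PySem

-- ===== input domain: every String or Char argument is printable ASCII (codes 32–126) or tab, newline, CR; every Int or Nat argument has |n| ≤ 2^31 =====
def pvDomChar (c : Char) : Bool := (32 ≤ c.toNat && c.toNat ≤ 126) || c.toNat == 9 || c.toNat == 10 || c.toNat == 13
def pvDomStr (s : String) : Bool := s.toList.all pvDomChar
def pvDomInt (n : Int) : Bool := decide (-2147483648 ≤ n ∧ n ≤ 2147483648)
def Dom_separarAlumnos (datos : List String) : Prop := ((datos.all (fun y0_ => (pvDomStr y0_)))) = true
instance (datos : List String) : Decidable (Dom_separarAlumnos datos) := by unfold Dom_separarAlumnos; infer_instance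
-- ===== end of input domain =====

-- B replaces A's char-by-char tokenizer FSM with split-on-';' plus strip, and the four
-- .replace scrubs with one single-pass filter (objective: idiomatic; same asymptotic cost).

-- ===== PORT A =====
-- A's separarDatos: char-by-char loop with accumulator (temp, listaTemp); pieces kept as
-- List Char (Python str concatenation temp += char is temp ++ [c]), String.mk at the end.
def separarDatos (datos : String) (separador : Char) : List String :=
  let st := datos.toList.foldl
    (fun (st : List Char × List (List Char)) c =>
      if c = separador then ([], st.2 ++ [PySem.Chars.strip st.1])
      else (st.1 ++ [c], st.2)) ([], [])
  let fin := if PySem.Chars.strip st.1 ≠ [] then st.2 ++ [PySem.Chars.strip st.1] else st.2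
  fin.map String.mk

def separarAlumnos (datos : List String) : List (List String) :=
  datos.foldl (fun alumnos1 i =>
    let i1 := PySem.Str.replace i "<" ""
    let i2 := PySem.Str.replace i1 ">" ""
    let i3 := PySem.Str.replace i2 "," ""
    let i4 := PySem.Str.replace i3 "\"" ""
    alumnos1 ++ [separarDatos i4 ';']) []

-- ===== PORT B =====
-- Source B's _fila: single-pass filter scrub, then split(';'), strip of parts[:-1], last kept if non-empty.
def filaB (i : String) : List String :=
  let s := i.toList.filter (fun c => !(['<', '>', ',', '"'].contains c))
  let parts := PySem.Chars.splitOn s [';']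
  let fila := (PySem.List.slice parts none (some (-1))).map
      (fun p => String.mk (PySem.Chars.strip p))
  let last := PySem.Chars.strip (PySem.List.pyGetD parts (-1) [])
  if last ≠ [] then fila ++ [String.mk last] else fila

def separarAlumnos_alt (datos : List String) : List (List String) :=
  datos.map filaB

-- ===== PRECONDITION & SPEC =====
def Spec_separarAlumnos (datos : List String) (out : List (List String)) : Prop := out = separarAlumnos_alt datos
instance (datos : List String) (out : List (List String)) : Decidable (Spec_separarAlumnos datos out) := by unfold Spec_separarAlumnos; infer_instance

-- ===== CLAIM (what is proved, stated in full; the proofs are below) =====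
def Claim_equal_separarAlumnos : Prop := ∀ (datos : List String), Dom_separarAlumnos datos → Spec_separarAlumnos datos (separarAlumnos datos)

-- ===== LEMMAS AND PROOFS =====

-- Simple recursive characterisation of splitting a char list on ';' (empty pieces kept).
def splitSemis : List Char → List (List Char)
  | [] => [[]]
  | c :: cs => if c = ';' then [] :: splitSemis cs else (splitSemis cs).modifyHead (c :: ·)

theorem splitSemis_ne_nil (cs : List Char) : splitSemis cs ≠ [] := by
  cases cs with
  | nil => simp [splitSemis]
  | cons c cs =>
    simp only [splitSemis]
    split_ifs
    · simp
    · cases h : splitSemis cs with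
      | nil => exact absurd h (splitSemis_ne_nil cs)
      | cons a l => simp

theorem splitSemis_cons_semi (t : List Char) : splitSemis (';' :: t) = [] :: splitSemis t := by
  simp [splitSemis]

theorem splitSemis_cons_ne {c : Char} (t : List Char) (hc : c ≠ ';') :
    splitSemis (c :: t) = (splitSemis t).modifyHead (c :: ·) := by
  simp [splitSemis, hc]

theorem modifyHead_nil_append (l : List (List Char)) :
    l.modifyHead (fun x => ([] : List Char) ++ x) = l := by
  cases l <;> simp

theorem go_splitOn (l : List Char) : ∀ (fuel : Nat) (cur : List Char) (acc : List (List Char)),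
    l.length < fuel →
    PySem.Chars.splitOn.go [';'] fuel l cur acc
      = acc.reverse ++ (splitSemis l).modifyHead (cur.reverse ++ ·) := by
  induction l with
  | nil =>
    intro fuel cur acc h
    match fuel with
    | f + 1 => simp [PySem.Chars.splitOn.go, splitSemis]
  | cons c t ih =>
    intro fuel cur acc h
    match fuel with
    | f + 1 =>
      simp only [PySem.Chars.splitOn.go]
      by_cases hc : c = ';'
      · subst hc
        have hpre : [';'].isPrefixOf (';' :: t) = true := by simp [List.isPrefixOf]
        rw [if_pos hpre]
        simp only [List.length_cons, List.length_nil, List.drop_succ_cons, List.drop_zero]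
        rw [ih f [] (cur.reverse :: acc) (by simpa using Nat.lt_of_succ_lt_succ h)]
        rw [splitSemis_cons_semi]
        cases splitSemis t <;> simp
      · have hpre : [';'].isPrefixOf (c :: t) = false := by
          simp [List.isPrefixOf]; exact fun hh => absurd hh.symm hc
        rw [if_neg (by simp [hpre])]
        rw [ih f (c :: cur) acc (by simpa using Nat.lt_of_succ_lt_succ h)]
        rw [splitSemis_cons_ne t hc]
        simp only [List.modifyHead_modifyHead]
        have hfun : ((fun x => cur.reverse ++ x) ∘ fun x => c :: x)
            = (fun x => (c :: cur).reverse ++ x) := by funext x; simp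
        rw [hfun]

theorem splitOn_eq_splitSemis (cs : List Char) :
    PySem.Chars.splitOn cs [';'] = splitSemis cs := by
  unfold PySem.Chars.splitOn
  rw [go_splitOn cs (cs.length + 1) [] [] (by omega)]
  simp only [List.reverse_nil, List.nil_append]
  exact modifyHead_nil_append _

theorem go_replace (c : Char) (l : List Char) :
    ∀ (fuel : Nat) (acc : List Char), l.length ≤ fuel →
    PySem.Chars.replace.go [c] [] fuel l acc = acc.reverse ++ l.filter (· ≠ c) := by
  induction l with
  | nil =>
    intro fuel acc h
    match fuel with
    | 0 => simp [PySem.Chars.replace.go]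
    | f + 1 => simp [PySem.Chars.replace.go]
  | cons a t ih =>
    intro fuel acc h
    match fuel with
    | f + 1 =>
      simp only [PySem.Chars.replace.go]
      by_cases hc : a = c
      · subst hc
        have hpre : [a].isPrefixOf (a :: t) = true := by simp [List.isPrefixOf]
        rw [if_pos hpre]
        simp only [List.length_cons, List.length_nil, List.drop_succ_cons, List.drop_zero,
          List.reverse_nil, List.nil_append]
        rw [ih f acc (by simpa using Nat.le_of_succ_le_succ h)]
        simp
      · have hpre : [c].isPrefixOf (a :: t) = false := by
          simp [List.isPrefixOf]; exact fun hh => hc hh.symm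
        rw [if_neg (by simp [hpre])]
        rw [ih f (a :: acc) (by simpa using Nat.le_of_succ_le_succ h)]
        simp [hc]

theorem replace_single (l : List Char) (c : Char) :
    PySem.Chars.replace l [c] [] = l.filter (· ≠ c) := by
  unfold PySem.Chars.replace
  rw [if_neg (by simp), go_replace c l l.length [] (le_refl _)]
  simp

-- A's four replace scrubs equal B's single filter.
theorem scrub_eq (l : List Char) :
    PySem.Chars.replace (PySem.Chars.replace (PySem.Chars.replace
        (PySem.Chars.replace l ['<'] []) ['>'] []) [','] []) ['"'] []
      = l.filter (fun c => !(['<', '>', ',', '"'].contains c)) := by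
  simp only [replace_single, List.filter_filter]
  apply List.filter_congr
  intro x _
  by_cases h1 : x = '<' <;> by_cases h2 : x = '>' <;> by_cases h3 : x = ',' <;>
    by_cases h4 : x = '"' <;> simp_all

-- The FSM fold of A's separarDatos, characterised through splitSemis.
theorem foldlA (cs : List Char) : ∀ (temp : List Char) (lista : List (List Char)),
    cs.foldl (fun (st : List Char × List (List Char)) c =>
        if c = ';' then ([], st.2 ++ [PySem.Chars.strip st.1])
        else (st.1 ++ [c], st.2)) (temp, lista)
      = (((splitSemis cs).modifyHead (temp ++ ·)).getLastD [],
         lista ++ (((splitSemis cs).modifyHead (temp ++ ·)).dropLast).map PySem.Chars.strip) := by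
  induction cs with
  | nil => intro temp lista; simp [splitSemis]
  | cons c t ih =>
    intro temp lista
    simp only [List.foldl_cons]
    by_cases hc : c = ';'
    · subst hc
      rw [if_pos rfl, ih]
      have hne := splitSemis_ne_nil t
      obtain ⟨a, l, hS⟩ := List.exists_cons_of_ne_nil hne
      rw [modifyHead_nil_append, splitSemis_cons_semi, List.modifyHead_cons, hS]
      simp [List.getLastD_eq_getLast?]
    · rw [if_neg (by simpa using hc), ih]
      rw [splitSemis_cons_ne t hc]
      simp only [List.modifyHead_modifyHead]
      have hfun : ((fun x => temp ++ x) ∘ fun x => c :: x) = (fun x => (temp ++ [c]) ++ x) := by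
        funext x; simp
      rw [hfun]

-- separarDatos on the scrubbed string equals B's filaB piece formula.
theorem sepDatos_eq_filaB (i : String) :
    separarDatos i ';' = (
      let parts := splitSemis i.toList
      let fila := (parts.dropLast).map (fun p => String.mk (PySem.Chars.strip p))
      let last := PySem.Chars.strip (parts.getLastD [])
      if last ≠ [] then fila ++ [String.mk last] else fila) := by
  unfold separarDatos
  rw [foldlA i.toList [] []]
  rw [modifyHead_nil_append]
  simp only []
  split_ifs with hlast
  · simp [Function.comp_def, List.map_append]
  · simp [Function.comp_def]

theorem separarAlumnos_eq_each (datos : List String) :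
    separarAlumnos datos = datos.map (fun i =>
      let i1 := PySem.Str.replace i "<" ""
      let i2 := PySem.Str.replace i1 ">" ""
      let i3 := PySem.Str.replace i2 "," ""
      let i4 := PySem.Str.replace i3 "\"" ""
      separarDatos i4 ';') := by
  unfold separarAlumnos
  rw [PySem.List.foldl_append_singleton_eq_map]
  simp

theorem slice_neg_one {α : Type} (xs : List α) : PySem.List.slice xs none (some (-1)) = xs.dropLast := by
  simp [PySem.List.slice]
  rw [List.dropLast_eq_take]

theorem pyGetD_neg_one_getLastD {α : Type} (xs : List α) (d : α) (h : xs ≠ []) :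
    PySem.List.pyGetD xs (-1) d = xs.getLastD d := by
  rw [PySem.List.pyGetD_neg_one xs d h, List.getLastD_eq_getLast?, List.getLast?_eq_getLast h]
  rfl

-- ===== VERDICT (by name: the statement is the Claim_ definition above) =====
theorem separarAlumnos_spec : Claim_equal_separarAlumnos := by
  intro datos _
  unfold Spec_separarAlumnos separarAlumnos_alt
  rw [separarAlumnos_eq_each]
  apply List.map_congr_left
  intro i _
  simp only []
  rw [sepDatos_eq_filaB]
  unfold filaB
  simp only []
  rw [splitOn_eq_splitSemis, slice_neg_one,
    pyGetD_neg_one_getLastD _ _ (splitSemis_ne_nil _)]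
  have hs : (PySem.Str.replace (PySem.Str.replace (PySem.Str.replace
        (PySem.Str.replace i "<" "") ">" "") "," "") "\"" "").toList
      = i.toList.filter (fun c => !(['<', '>', ',', '"'].contains c)) := by
    simp only [PySem.Str.toList_replace]
    have h1 : ("<" : String).toList = ['<'] := rfl
    have h2 : (">" : String).toList = ['>'] := rfl
    have h3 : ("," : String).toList = [','] := rfl
    have h4 : ("\"" : String).toList = ['"'] := rfl
    have h0 : ("" : String).toList = [] := rfl
    rw [h1, h2, h3, h4, h0]
    exact scrub_eq i.toList
  rw [hs]
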